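-- pv_equiv track=rewrite | github.com/phporath/CS50-Harvard-Python | week_2/plates/plates.py | rule_three
-- ===== SOURCE A (Python) =====
-- def rule_three(string):
--     previous = ''
--     for c in string:
--         if c == '0' and previous == '':
--             return False
--         if c.isnumeric() is True:
--             previous = 'number'
--         else:
--             if previous == 'number':
--                 return False
--     return True
-- ===== SOURCE B (Python) =====
-- def rule_three(string):
--     # find the first numeric character; everything from there on must be numeric,
--     # and it must not start with '0'
--     for i, c in enumerate(string):
--         if c.isnumeric():
--             if c == '0':
--                 return False
--             return all(ch.isnumeric() for ch in string[i:])
--     return True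
-- ===== Notes on version B (the rewrite author's own statement) =====
-- stated objective: simpler
-- what changed: Replaces A's stateful flag-carrying scan with a boundary-find: locate the first numeric character, reject it if it is zero, and validate the entire remaining suffix with all(); no state variable survives between iterations.
import Mathlib
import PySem

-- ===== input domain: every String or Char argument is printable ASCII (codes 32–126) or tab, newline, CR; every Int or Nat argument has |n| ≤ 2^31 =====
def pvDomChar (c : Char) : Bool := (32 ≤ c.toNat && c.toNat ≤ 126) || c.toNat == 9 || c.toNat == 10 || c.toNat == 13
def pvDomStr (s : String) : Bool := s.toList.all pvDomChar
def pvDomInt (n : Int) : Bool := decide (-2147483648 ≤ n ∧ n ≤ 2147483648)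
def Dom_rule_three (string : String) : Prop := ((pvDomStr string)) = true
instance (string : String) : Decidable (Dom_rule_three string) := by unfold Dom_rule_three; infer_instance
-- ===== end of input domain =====

-- B replaces A's stateful flag-scan with a find-first-numeric boundary plus a suffix check (objective: simpler).
-- On the printable-ASCII domain, Python's c.isnumeric() coincides with PySem.Chars.isdigit c.

-- ===== PORT A =====
-- A's loop: 'previous' is '' until a numeric char is seen, then 'number' forever.
def rule_three_loop : List Char → String → Bool
  | [], _ => true
  | c :: rest, previous =>
      if c = '0' ∧ previous = "" then false
      else if PySem.Chars.isdigit c then rule_three_loop rest "number"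
      else if previous = "number" then false
      else rule_three_loop rest previous

def rule_three (string : String) : Bool := rule_three_loop string.toList ""

-- ===== PORT B =====
-- B's loop: scan for the first numeric char; from there, reject '0' and demand an all-numeric suffix.
def rule_three_alt_loop : List Char → Bool
  | [] => true
  | c :: rest =>
      if PySem.Chars.isdigit c then
        if c = '0' then false
        else (c :: rest).all PySem.Chars.isdigit
      else rule_three_alt_loop rest

def rule_three_alt (string : String) : Bool := rule_three_alt_loop string.toList

-- ===== PRECONDITION & SPEC =====
def Spec_rule_three (string : String) (out : Bool) : Prop := out = rule_three_alt string
instance (string : String) (out : Bool) : Decidable (Spec_rule_three string out) := by unfold Spec_rule_three; infer_instance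

-- ===== CLAIM (what is proved, stated in full; the proofs are below) =====
def Claim_equal_rule_three : Prop := ∀ (string : String), Dom_rule_three string → Spec_rule_three string (rule_three string)

-- ===== LEMMAS AND PROOFS =====
lemma loopA_number (l : List Char) : rule_three_loop l "number" = l.all PySem.Chars.isdigit := by
  induction l with
  | nil => rfl
  | cons c rest ih =>
      simp only [rule_three_loop, List.all_cons]
      by_cases hd : PySem.Chars.isdigit c
      · have h0 : ¬ (c = '0' ∧ ("number" : String) = "") := by simp
        simp [hd, ih]
      · simp [hd]

lemma loopA_eq_loopB (l : List Char) : rule_three_loop l "" = rule_three_alt_loop l := by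
  induction l with
  | nil => rfl
  | cons c rest ih =>
      simp only [rule_three_loop, rule_three_alt_loop]
      by_cases h0 : c = '0'
      · have : PySem.Chars.isdigit '0' = true := by decide
        simp [h0, this]
      · by_cases hd : PySem.Chars.isdigit c
        · simp [h0, hd, loopA_number, List.all_cons]
        · simp [h0, hd, ih]

-- ===== VERDICT (by name: the statement is the Claim_ definition above) =====
theorem rule_three_spec : Claim_equal_rule_three := by
  intro s _
  unfold Spec_rule_three rule_three rule_three_alt
  exact loopA_eq_loopB s.toList
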